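-- pv_equiv track=rewrite | github.com/seanlewis08/popcornmachine | pipeline/transform.py | _split_rotation_stint
-- ===== SOURCE A (Python) =====
-- def _period_boundary_decisecs(period: int) -> int:
--     """Return the ending decisecond timestamp for a given period.
--
--     Regulation periods (1-4) are each 7200 deciseconds (720 seconds).
--     OT periods (5+) are each 3000 deciseconds (300 seconds).
--     """
--     if period <= 4:
--         return period * 7200
--     else:
--         return 4 * 7200 + (period - 4) * 3000
--
-- def _period_duration_secs(period: int) -> int:
--     """Return the duration of a period in seconds (720 for regulation, 300 for OT)."""
--     return 300 if period > 4 else 720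
--
-- def _decisecs_to_period(decisecs: int) -> int:
--     """Determine which period a decisecond timestamp falls in."""
--     if decisecs < 4 * 7200:
--         return decisecs // 7200 + 1
--     else:
--         return 5 + (decisecs - 4 * 7200) // 3000
--
-- def _split_rotation_stint(
--     in_time_real: int, out_time_real: int
-- ) -> list[tuple[int, str, str, int, int]]:
--     """
--     Split a rotation stint that may cross period boundaries into per-period segments.
--
--     The NBA GameRotation API returns IN_TIME_REAL/OUT_TIME_REAL in deciseconds.
--     When a player stays on court across a period boundary (e.g., Q2 into Q3),
--     the API returns a single row spanning both periods. This function splits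
--     such stints at period boundaries.
--
--     Args:
--         in_time_real: In-time in deciseconds (elapsed from game start)
--         out_time_real: Out-time in deciseconds (elapsed from game start)
--
--     Returns:
--         List of (period, in_clock, out_clock, segment_in_real, segment_out_real)
--         tuples — one per period the stint covers. The last two values are the
--         raw decisecond boundaries for the segment (used for PBP filtering and
--         minutes calculation).
--     """
--     in_time_real = int(in_time_real)
--     out_time_real = int(out_time_real)
--
--     segments: list[tuple[int, str, str, int, int]] = []
--
--     current = in_time_real
--     while current < out_time_real:
--         period = _decisecs_to_period(current)
--         period_end = _period_boundary_decisecs(period)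
--         period_start_decisecs = period_end - _period_duration_secs(period) * 10
--         period_dur_secs = _period_duration_secs(period)
--
--         # This segment ends at the earlier of: the stint end, or the period end
--         segment_end = min(out_time_real, period_end)
--
--         # Convert to countdown clocks within this period
--         in_elapsed_secs = (current - period_start_decisecs) // 10
--         out_elapsed_secs = (segment_end - period_start_decisecs) // 10
--
--         in_remaining = max(0, period_dur_secs - in_elapsed_secs)
--         out_remaining = max(0, period_dur_secs - out_elapsed_secs)
--
--         in_clock = _seconds_to_clock(in_remaining)
--         out_clock = _seconds_to_clock(out_remaining)
--
--         segments.append((period, in_clock, out_clock, current, segment_end))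
--         current = segment_end
--
--     return segments
--
-- def _seconds_to_clock(seconds) -> str:
--     """Convert seconds to MM:SS clock format."""
--     seconds = int(seconds)
--     minutes = seconds // 60
--     secs = seconds % 60
--     return f"{minutes}:{secs:02d}"
-- ===== SOURCE B (Python) =====
-- def _period_boundary_decisecs(period: int) -> int:
--     if period <= 4:
--         return period * 7200
--     else:
--         return 4 * 7200 + (period - 4) * 3000
--
-- def _period_duration_secs(period: int) -> int:
--     return 300 if period > 4 else 720
--
-- def _decisecs_to_period(decisecs: int) -> int:
--     if decisecs < 4 * 7200:
--         return decisecs // 7200 + 1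
--     else:
--         return 5 + (decisecs - 4 * 7200) // 3000
--
-- def _seconds_to_clock(seconds) -> str:
--     seconds = int(seconds)
--     minutes = seconds // 60
--     secs = seconds % 60
--     return f"{minutes}:{secs:02d}"
--
-- def _split_rotation_stint(in_time_real, out_time_real):
--     in_t = int(in_time_real)
--     out_t = int(out_time_real)
--     if in_t >= out_t:
--         return []
--     first = _decisecs_to_period(in_t)
--     last = _decisecs_to_period(out_t - 1)
--     segments = []
--     for period in range(first, last + 1):
--         period_end = _period_boundary_decisecs(period)
--         dur = _period_duration_secs(period)
--         period_start = period_end - dur * 10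
--         seg_in = max(in_t, period_start)
--         seg_out = min(out_t, period_end)
--         in_clock = _seconds_to_clock(max(0, dur - (seg_in - period_start) // 10))
--         out_clock = _seconds_to_clock(max(0, dur - (seg_out - period_start) // 10))
--         segments.append((period, in_clock, out_clock, seg_in, seg_out))
--     return segments
-- ===== Notes on version B (the rewrite author's own statement) =====
-- stated objective: alternative
-- what changed: Replaces A's stateful while-loop with a moving `current` pointer by a for-loop over period indices from the first to the last covered period, computing each segment's start/end in closed form from the period number with max/min clamps.
import Mathlib
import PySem

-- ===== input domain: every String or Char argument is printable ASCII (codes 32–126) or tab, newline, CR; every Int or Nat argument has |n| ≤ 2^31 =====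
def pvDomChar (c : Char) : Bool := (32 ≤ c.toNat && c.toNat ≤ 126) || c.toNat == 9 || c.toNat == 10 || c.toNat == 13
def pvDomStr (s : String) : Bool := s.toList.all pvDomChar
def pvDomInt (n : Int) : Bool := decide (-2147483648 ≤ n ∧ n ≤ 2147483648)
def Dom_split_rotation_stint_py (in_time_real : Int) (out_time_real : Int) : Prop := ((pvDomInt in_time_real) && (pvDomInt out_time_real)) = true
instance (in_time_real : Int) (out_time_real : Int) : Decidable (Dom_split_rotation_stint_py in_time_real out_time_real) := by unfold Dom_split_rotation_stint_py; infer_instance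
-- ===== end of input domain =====

-- B replaces A's stateful while-loop (moving `current` pointer) by direct iteration over
-- period indices, computing each segment's bounds in closed form from the period number
-- (objective: alternative decomposition, same cost; not claimed faster).

-- ===== PORT A =====
-- shared module helpers (identical in Source A and Source B)
def period_boundary_decisecs (period : Int) : Int :=
  if period ≤ 4 then period * 7200 else 4 * 7200 + (period - 4) * 3000

def period_duration_secs (period : Int) : Int :=
  if period > 4 then 300 else 720

def decisecs_to_period (decisecs : Int) : Int :=
  if decisecs < 4 * 7200 then PySem.Int.floordiv decisecs 7200 + 1
  else 5 + PySem.Int.floordiv (decisecs - 4 * 7200) 3000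

-- f"{minutes}:{secs:02d}" (secs = s % 60 is always in [0,60), so the pad is a plain leading zero)
def seconds_to_clock (s : Int) : String :=
  PySem.Int.toStr (PySem.Int.floordiv s 60) ++ ":" ++
    (if PySem.Int.mod s 60 < 10 then "0" ++ PySem.Int.toStr (PySem.Int.mod s 60)
     else PySem.Int.toStr (PySem.Int.mod s 60))

-- termination fact for A's while loop, cited by `decreasing_by`
theorem lt_boundary_of_period (d : Int) : d < period_boundary_decisecs (decisecs_to_period d) := by
  unfold period_boundary_decisecs decisecs_to_period
  by_cases hd : d < 4 * 7200
  · have h1 := PySem.Int.floordiv_mul_add_mod d 7200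
    have h2 := PySem.Int.mod_nonneg d (b := 7200) (by norm_num)
    have h3 := PySem.Int.mod_lt d (b := 7200) (by norm_num)
    simp only [if_pos hd]
    split_ifs with h <;> omega
  · have h1 := PySem.Int.floordiv_mul_add_mod (d - 4 * 7200) 3000
    have h2 := PySem.Int.mod_nonneg (d - 4 * 7200) (b := 3000) (by norm_num)
    have h3 := PySem.Int.mod_lt (d - 4 * 7200) (b := 3000) (by norm_num)
    simp only [if_neg hd]
    split_ifs with h <;> omega

-- A's while loop, step for step
def split_loop (out_time_real : Int) (current : Int) : List (Int × String × String × Int × Int) :=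
  if h : current < out_time_real then
    let period := decisecs_to_period current
    let period_end := period_boundary_decisecs period
    let period_start_decisecs := period_end - period_duration_secs period * 10
    let period_dur_secs := period_duration_secs period
    let segment_end := min out_time_real period_end
    let in_elapsed_secs := PySem.Int.floordiv (current - period_start_decisecs) 10
    let out_elapsed_secs := PySem.Int.floordiv (segment_end - period_start_decisecs) 10
    let in_remaining := max 0 (period_dur_secs - in_elapsed_secs)
    let out_remaining := max 0 (period_dur_secs - out_elapsed_secs)
    (period, seconds_to_clock in_remaining, seconds_to_clock out_remaining, current, segment_end)
      :: split_loop out_time_real segment_end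
  else []
termination_by (out_time_real - current).toNat
decreasing_by
  have := lt_boundary_of_period current
  simp only [min_def]
  split_ifs <;> omega

def split_rotation_stint_py (in_time_real : Int) (out_time_real : Int) : List (Int × String × String × Int × Int) :=
  split_loop out_time_real in_time_real

-- ===== PORT B =====
-- body of Source B's for-loop over period numbers
def segment_of_period (in_t : Int) (out_t : Int) (period : Int) : Int × String × String × Int × Int :=
  let period_end := period_boundary_decisecs period
  let dur := period_duration_secs period
  let period_start := period_end - dur * 10
  let seg_in := max in_t period_start
  let seg_out := min out_t period_end
  (period,
   seconds_to_clock (max 0 (dur - PySem.Int.floordiv (seg_in - period_start) 10)),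
   seconds_to_clock (max 0 (dur - PySem.Int.floordiv (seg_out - period_start) 10)),
   seg_in, seg_out)

def split_rotation_stint_py_alt (in_time_real : Int) (out_time_real : Int) : List (Int × String × String × Int × Int) :=
  if out_time_real ≤ in_time_real then []
  else
    (PySem.List.pyRange (decisecs_to_period in_time_real)
        (decisecs_to_period (out_time_real - 1) + 1) 1).map
      (segment_of_period in_time_real out_time_real)

-- ===== PRECONDITION & SPEC =====
def Spec_split_rotation_stint_py (in_time_real : Int) (out_time_real : Int) (out : List (Int × String × String × Int × Int)) : Prop := out = split_rotation_stint_py_alt in_time_real out_time_real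
instance (in_time_real : Int) (out_time_real : Int) (out : List (Int × String × String × Int × Int)) : Decidable (Spec_split_rotation_stint_py in_time_real out_time_real out) := by unfold Spec_split_rotation_stint_py; infer_instance

-- ===== CLAIM (what is proved, stated in full; the proofs are below) =====
def Claim_equal_split_rotation_stint_py : Prop := ∀ (in_time_real : Int) (out_time_real : Int), Dom_split_rotation_stint_py in_time_real out_time_real → Spec_split_rotation_stint_py in_time_real out_time_real (split_rotation_stint_py in_time_real out_time_real)

-- ===== LEMMAS AND PROOFS =====

-- the start of the period containing d lies at or before d
theorem start_le_of_period (d : Int) :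
    period_boundary_decisecs (decisecs_to_period d) -
      period_duration_secs (decisecs_to_period d) * 10 ≤ d := by
  unfold period_boundary_decisecs period_duration_secs decisecs_to_period
  by_cases hd : d < 4 * 7200
  · have h1 := PySem.Int.floordiv_mul_add_mod d 7200
    have h2 := PySem.Int.mod_nonneg d (b := 7200) (by norm_num)
    have h3 := PySem.Int.mod_lt d (b := 7200) (by norm_num)
    simp only [if_pos hd]
    split_ifs <;> omega
  · have h1 := PySem.Int.floordiv_mul_add_mod (d - 4 * 7200) 3000
    have h2 := PySem.Int.mod_nonneg (d - 4 * 7200) (b := 3000) (by norm_num)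
    have h3 := PySem.Int.mod_lt (d - 4 * 7200) (b := 3000) (by norm_num)
    simp only [if_neg hd]
    split_ifs <;> omega

-- characterization: if d lies in period q's half-open window, its period is q
theorem period_eq_of_window (q d : Int)
    (h1 : period_boundary_decisecs q - period_duration_secs q * 10 ≤ d)
    (h2 : d < period_boundary_decisecs q) : decisecs_to_period d = q := by
  simp only [period_boundary_decisecs, period_duration_secs] at h1 h2
  unfold decisecs_to_period
  by_cases hq : q ≤ 4
  · simp only [if_pos hq, if_neg (by omega : ¬ q > 4)] at h1 h2
    have hd : d < 4 * 7200 := by omega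
    simp only [if_pos hd]
    have g1 := PySem.Int.floordiv_mul_add_mod d 7200
    have g2 := PySem.Int.mod_nonneg d (b := 7200) (by norm_num)
    have g3 := PySem.Int.mod_lt d (b := 7200) (by norm_num)
    omega
  · simp only [if_neg hq, if_pos (by omega : q > 4)] at h1 h2
    have hd : ¬ d < 4 * 7200 := by omega
    simp only [if_neg hd]
    have g1 := PySem.Int.floordiv_mul_add_mod (d - 4 * 7200) 3000
    have g2 := PySem.Int.mod_nonneg (d - 4 * 7200) (b := 3000) (by norm_num)
    have g3 := PySem.Int.mod_lt (d - 4 * 7200) (b := 3000) (by norm_num)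
    omega

-- period p+1 starts exactly where period p ends
theorem start_succ (p : Int) :
    period_boundary_decisecs (p + 1) - period_duration_secs (p + 1) * 10 =
      period_boundary_decisecs p := by
  unfold period_boundary_decisecs period_duration_secs
  split_ifs <;> omega

theorem start_lt_end (p : Int) :
    period_boundary_decisecs p - period_duration_secs p * 10 < period_boundary_decisecs p := by
  unfold period_boundary_decisecs period_duration_secs
  split_ifs <;> omega

theorem start_mono {p q : Int} (h : p ≤ q) :
    period_boundary_decisecs p - period_duration_secs p * 10 ≤
      period_boundary_decisecs q - period_duration_secs q * 10 := by
  unfold period_boundary_decisecs period_duration_secs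
  split_ifs <;> omega

theorem period_mono {d e : Int} (h : d ≤ e) : decisecs_to_period d ≤ decisecs_to_period e := by
  by_contra hc
  push_neg at hc
  have h1 : decisecs_to_period e + 1 ≤ decisecs_to_period d := by omega
  have h2 := start_mono h1
  rw [start_succ] at h2
  have h3 := start_le_of_period d
  have h4 := lt_boundary_of_period e
  omega

-- B's segment does not depend on which lower bound is used, once both lie at/below the period start
theorem segment_congr {a b : Int} (out_t period : Int)
    (ha : a ≤ period_boundary_decisecs period - period_duration_secs period * 10)
    (hb : b ≤ period_boundary_decisecs period - period_duration_secs period * 10) :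
    segment_of_period a out_t period = segment_of_period b out_t period := by
  simp only [segment_of_period]
  rw [max_eq_right ha, max_eq_right hb]

-- the main loop invariant: from any current < out, A's loop emits exactly B's per-period map
theorem split_loop_eq (n : Nat) : ∀ (out_t c : Int), (out_t - c).toNat ≤ n → c < out_t →
    split_loop out_t c =
      (PySem.List.pyRange (decisecs_to_period c) (decisecs_to_period (out_t - 1) + 1) 1).map
        (segment_of_period c out_t) := by
  induction n with
  | zero => intro out_t c hn h; omega
  | succ n ih =>
    intro out_t c hn h
    have hend := lt_boundary_of_period c
    have hstart := start_le_of_period c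
    rw [split_loop]
    simp only [dif_pos h]
    by_cases hcase : out_t ≤ period_boundary_decisecs (decisecs_to_period c)
    · -- last period: single segment, loop stops
      have hmin : min out_t (period_boundary_decisecs (decisecs_to_period c)) = out_t :=
        min_eq_left hcase
      have hlast : decisecs_to_period (out_t - 1) = decisecs_to_period c :=
        period_eq_of_window (decisecs_to_period c) (out_t - 1) (by omega) (by omega)
      rw [hlast, PySem.List.pyRange_one_cons (by omega), PySem.List.pyRange_one_eq_nil (by omega)]
      rw [hmin, split_loop]
      simp only [dif_neg (lt_irrefl out_t), List.map_cons, List.map_nil]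
      simp only [segment_of_period, hmin, max_eq_left hstart]
    · -- stint continues past this period's end
      push Not at hcase
      have hmin : min out_t (period_boundary_decisecs (decisecs_to_period c)) =
          period_boundary_decisecs (decisecs_to_period c) := min_eq_right (le_of_lt hcase)
      have hPe : decisecs_to_period (period_boundary_decisecs (decisecs_to_period c)) =
          decisecs_to_period c + 1 := by
        apply period_eq_of_window
        · rw [start_succ]
        · have := start_lt_end (decisecs_to_period c + 1)
          rw [start_succ] at this
          exact this
      have hrec := ih out_t (period_boundary_decisecs (decisecs_to_period c)) (by omega) hcase
      rw [hmin, hrec, hPe]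
      have hle : decisecs_to_period c ≤ decisecs_to_period (out_t - 1) := by
        exact period_mono (by omega)
      rw [PySem.List.pyRange_one_cons
        (by omega : decisecs_to_period c < decisecs_to_period (out_t - 1) + 1)]
      rw [List.map_cons]
      congr 1
      · simp only [segment_of_period, hmin, max_eq_left hstart]
      · apply List.map_congr_left
        intro period hmem
        rw [PySem.List.mem_pyRange_one] at hmem
        have hs : period_boundary_decisecs (decisecs_to_period c) ≤
            period_boundary_decisecs period - period_duration_secs period * 10 := by
          have := start_mono (show decisecs_to_period c + 1 ≤ period by omega)
          rw [start_succ] at this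
          exact this
        exact segment_congr out_t period hs (by omega)

-- ===== VERDICT (by name: the statement is the Claim_ definition above) =====
theorem split_rotation_stint_py_spec : Claim_equal_split_rotation_stint_py := by
  intro in_t out_t _
  unfold Spec_split_rotation_stint_py split_rotation_stint_py split_rotation_stint_py_alt
  by_cases h : out_t ≤ in_t
  · rw [if_pos h, split_loop]
    simp only [dif_neg (by omega : ¬ in_t < out_t)]
  · rw [if_neg h]
    exact split_loop_eq (out_t - in_t).toNat out_t in_t (le_refl _) (by omega)
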